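-- pv_equiv track=rewrite | github.com/mdmdmdmdmdmd/2problems | src/main2.py | longest_sequence_of_1s_start_position
-- ===== SOURCE A (Python) =====
-- def longest_sequence_of_1s_start_position(num):
--     # Convert number to binary string without the '0b' prefix
--     binary_representation = bin(num)[2:]
--
--     max_length = 0
--     max_start_position = -1
--
--     current_length = 0
--     current_start_position = -1
--
--     for i, char in enumerate(binary_representation):
--         if char == '1':
--             if current_length == 0:
--                 current_start_position = i + 1  # Position is 1-indexed
--             current_length += 1
--             if current_length > max_length:
--                 max_length = current_length
--                 max_start_position = current_start_position
--         else:
--             current_length = 0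
--
--     return max_start_position
-- ===== SOURCE B (Python) =====
-- import re
--
-- def longest_sequence_of_1s_start_position(num):
--     s = bin(num)[2:]
--     best_len = 0
--     best_start = -1
--     for m in re.finditer('1+', s):
--         run_len = m.end() - m.start()
--         if run_len > best_len:
--             best_len = run_len
--             best_start = m.start() + 1
--     return best_start
-- ===== Notes on version B (the rewrite author's own statement) =====
-- stated objective: simpler
-- what changed: Replaces A's incremental four-variable state machine over characters with a 'collect maximal 1-runs via re.finditer, then keep the first strictly longest' decomposition.
import Mathlib
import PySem

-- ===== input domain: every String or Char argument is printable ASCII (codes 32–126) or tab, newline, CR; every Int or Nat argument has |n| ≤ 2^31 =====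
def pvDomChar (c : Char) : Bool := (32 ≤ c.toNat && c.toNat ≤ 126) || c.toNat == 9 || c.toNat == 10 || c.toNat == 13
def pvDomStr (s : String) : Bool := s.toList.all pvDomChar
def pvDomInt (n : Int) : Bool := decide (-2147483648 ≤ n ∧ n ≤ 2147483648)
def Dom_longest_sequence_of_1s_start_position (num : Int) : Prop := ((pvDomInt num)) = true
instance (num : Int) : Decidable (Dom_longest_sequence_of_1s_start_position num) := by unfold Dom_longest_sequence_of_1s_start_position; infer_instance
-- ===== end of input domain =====

-- B rewrites A's incremental four-variable state machine as 'collect the maximal runs of 1s, then keep the first strictly longest'.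

-- shared helper: port of Python's bin(num)[2:] as a character list.
-- binary digits of n (msb first), accumulated back-to-front; bin() of a positive int.
def pvNatBinAux : Nat → List Char → List Char
  | 0, acc => acc
  | n + 1, acc => pvNatBinAux ((n + 1) / 2) ((if (n + 1) % 2 = 1 then '1' else '0') :: acc)
decreasing_by exact Nat.div_lt_self (Nat.succ_pos n) (by norm_num)

def pvNatBin (n : Nat) : List Char := if n = 0 then ['0'] else pvNatBinAux n []

-- bin(num)[2:]: for num < 0, bin gives '-0b…' so [2:] keeps a leading 'b' (exact Python behaviour)
def pvBinTail (num : Int) : List Char :=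
  if num < 0 then 'b' :: pvNatBin (-num).toNat else pvNatBin num.toNat

-- ===== PORT A =====
-- A's loop state: max_length, max_start_position, current_length, current_start_position
def pvLoopA : List Char → Int → Int → Int → Int → Int → Int
  | [], _, _, ms, _, _ => ms
  | c :: t, i, ml, ms, cl, cs =>
    if c = '1' then
      let cs' := if cl = 0 then i + 1 else cs
      let cl' := cl + 1
      if cl' > ml then pvLoopA t (i + 1) cl' cs' cl' cs'
      else pvLoopA t (i + 1) ml ms cl' cs'
    else pvLoopA t (i + 1) ml ms 0 cs

def longest_sequence_of_1s_start_position (num : Int) : Int :=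
  pvLoopA (pvBinTail num) 0 0 (-1) 0 (-1)

-- ===== PORT B =====
-- port of re.finditer('1+', s): the maximal runs of '1' as (start, length) pairs, in order
def pvRuns : List Char → Int → Option (Int × Int) → List (Int × Int)
  | [], _, none => []
  | [], _, some r => [r]
  | c :: t, i, none => if c = '1' then pvRuns t (i + 1) (some (i, 1)) else pvRuns t (i + 1) none
  | c :: t, i, some (s, l) =>
    if c = '1' then pvRuns t (i + 1) (some (s, l + 1)) else (s, l) :: pvRuns t (i + 1) none

-- B's scan over the matches: keep the first run of strictly maximal length
def pvStep (b : Int × Int) (r : Int × Int) : Int × Int :=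
  if r.2 > b.1 then (r.2, r.1 + 1) else b

def longest_sequence_of_1s_start_position_alt (num : Int) : Int :=
  ((pvRuns (pvBinTail num) 0 none).foldl pvStep (0, -1)).2

-- ===== PRECONDITION & SPEC =====
def Spec_longest_sequence_of_1s_start_position (num : Int) (out : Int) : Prop := out = longest_sequence_of_1s_start_position_alt num
instance (num : Int) (out : Int) : Decidable (Spec_longest_sequence_of_1s_start_position num out) := by unfold Spec_longest_sequence_of_1s_start_position; infer_instance

-- ===== CLAIM (what is proved, stated in full; the proofs are below) =====
def Claim_equal_longest_sequence_of_1s_start_position : Prop := ∀ (num : Int), Dom_longest_sequence_of_1s_start_position num → Spec_longest_sequence_of_1s_start_position num (longest_sequence_of_1s_start_position num)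

-- ===== LEMMAS AND PROOFS =====

-- Invariant tying A's eagerly-maximised state to B's base best-pair plus the pending run:
-- with pending run (s, cl) (cl ≥ 1) A carries ml = max ml0 cl and ms = (if cl > ml0 then s+1 else ms0).
lemma pv_inv (t : List Char) : ∀ (i ml0 ms0 : Int),
    (∀ cs, pvLoopA t i ml0 ms0 0 cs = ((pvRuns t i none).foldl pvStep (ml0, ms0)).2) ∧
    (∀ s cl, 1 ≤ cl →
      pvLoopA t i (max ml0 cl) (if cl > ml0 then s + 1 else ms0) cl (s + 1)
        = ((pvRuns t i (some (s, cl))).foldl pvStep (ml0, ms0)).2) := by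
  induction t with
  | nil =>
    intro i ml0 ms0
    refine ⟨fun cs => rfl, fun s cl hcl => ?_⟩
    simp only [pvLoopA, pvRuns, List.foldl, pvStep]
    split_ifs with h <;> simp_all
  | cons c t ih =>
    intro i ml0 ms0
    constructor
    · intro cs
      by_cases hc : c = '1'
      · have key := (ih (i + 1) ml0 ms0).2 i 1 le_rfl
        simp only [pvLoopA, pvRuns, hc]
        simp only [show (0 : Int) + 1 = 1 by norm_num]
        by_cases h1 : (1 : Int) > ml0
        · rw [if_pos h1]
          have : max ml0 1 = 1 := by omega
          simpa [this, if_pos h1] using key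
        · rw [if_neg h1]
          have : max ml0 1 = ml0 := by omega
          simpa [this, if_neg h1] using key
      · simp only [pvLoopA, pvRuns, hc]
        exact (ih (i + 1) ml0 ms0).1 cs
    · intro s cl hcl
      by_cases hc : c = '1'
      · have key := (ih (i + 1) ml0 ms0).2 s (cl + 1) (by omega)
        simp only [pvLoopA, pvRuns, hc, reduceIte]
        have hne : ¬ (cl = 0) := by omega
        rw [if_neg hne]
        by_cases h1 : cl + 1 > max ml0 cl
        · rw [if_pos h1]
          rw [if_pos (show cl + 1 > ml0 by omega),
              show max ml0 (cl + 1) = cl + 1 by omega] at key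
          exact key
        · rw [if_neg h1, if_neg (show ¬ (cl > ml0) by omega),
              show max ml0 cl = ml0 by omega]
          rw [if_neg (show ¬ (cl + 1 > ml0) by omega),
              show max ml0 (cl + 1) = ml0 by omega] at key
          exact key
      · simp only [pvLoopA, pvRuns, hc, reduceIte, List.foldl_cons, pvStep]
        by_cases h1 : cl > ml0
        · rw [if_pos h1, show max ml0 cl = cl by omega,
              if_pos (show ((s, cl) : Int × Int).2 > ((ml0, ms0) : Int × Int).1 from h1)]
          exact (ih (i + 1) cl (s + 1)).1 (s + 1)
        · rw [if_neg h1, show max ml0 cl = ml0 by omega,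
              if_neg (show ¬ ((s, cl) : Int × Int).2 > ((ml0, ms0) : Int × Int).1 from h1)]
          exact (ih (i + 1) ml0 ms0).1 (s + 1)

-- ===== VERDICT (by name: the statement is the Claim_ definition above) =====
theorem longest_sequence_of_1s_start_position_spec : Claim_equal_longest_sequence_of_1s_start_position := by
  intro num _
  unfold Spec_longest_sequence_of_1s_start_position
  unfold longest_sequence_of_1s_start_position longest_sequence_of_1s_start_position_alt
  exact (pv_inv (pvBinTail num) 0 0 (-1)).1 (-1)
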